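-- pv_equiv track=rewrite | github.com/Dorothy594/Primal-Dual-Techniques-for-Distributed-Multitask-Learning | FederatedLearning/deep_learning_experiment.py | get_all_images_dict
-- ===== SOURCE A (Python) =====
-- def get_all_images_dict(data):
--     all_images_indices = {}
--     cnt = 0
--     for train_data in data:
--         for i, file_name in enumerate(train_data['train_df']):
--             if file_name not in all_images_indices:
--                 all_images_indices[file_name] = cnt
--                 cnt += 1
--     return all_images_indices
-- ===== SOURCE B (Python) =====
-- def get_all_images_dict(data):
--     flat = [file_name for train_data in data for file_name in train_data['train_df']]
--     first = {}
--     for i in range(len(flat) - 1, -1, -1):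
--         first[flat[i]] = i  # overwriting: the last write wins, i.e. the earliest occurrence
--     order = sorted(first, key=first.get)
--     return {name: rank for rank, name in enumerate(order)}
-- ===== Notes on version B (the rewrite author's own statement) =====
-- stated objective: alternative
-- what changed: Replaces the fused membership-check-plus-counter loop by a three-phase algorithm: a reverse overwrite pass records each name's first-occurrence position without any membership test, the distinct names are then sorted by that position, and ranks are assigned by enumeration.
import Mathlib
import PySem

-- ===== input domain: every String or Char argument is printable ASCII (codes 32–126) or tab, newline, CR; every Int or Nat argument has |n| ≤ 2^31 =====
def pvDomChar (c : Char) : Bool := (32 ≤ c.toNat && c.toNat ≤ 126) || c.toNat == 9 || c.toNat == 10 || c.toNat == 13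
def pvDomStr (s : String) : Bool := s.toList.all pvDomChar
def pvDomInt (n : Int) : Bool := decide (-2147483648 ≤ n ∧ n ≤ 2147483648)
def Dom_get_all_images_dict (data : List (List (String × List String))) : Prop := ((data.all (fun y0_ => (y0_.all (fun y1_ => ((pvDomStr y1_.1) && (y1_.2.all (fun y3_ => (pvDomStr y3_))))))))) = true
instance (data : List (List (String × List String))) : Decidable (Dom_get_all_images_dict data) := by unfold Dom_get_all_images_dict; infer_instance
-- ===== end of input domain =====

-- B replaces A's fused membership-check-plus-counter loop by a three-phase algorithm:
-- a reverse overwrite pass records first-occurrence positions, the distinct names are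
-- sorted by that position, and ranks are assigned by enumeration. Alternative, not faster.

-- ===== PORT A =====
-- train_data['train_df'] raises KeyError when the key is missing; ported with the
-- total getD … [] form, exact under Pre_ (every entry contains "train_df").
def get_all_images_dict (data : List (List (String × List String))) : List (String × Int) :=
  (data.foldl
    (fun st train_data =>
      (PySem.List.enumerate ((PySem.Dict.mk train_data).getD "train_df" [])).foldl
        (fun (st : PySem.Dict String Int × Int) p =>
          if st.1.contains p.2 then st else (st.1.insert p.2 st.2, st.2 + 1))
        st)
    (PySem.Dict.empty, 0)).1.items

-- ===== PORT B =====
def get_all_images_dict_alt (data : List (List (String × List String))) : List (String × Int) :=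
  let flat := data.flatMap (fun train_data => (PySem.Dict.mk train_data).getD "train_df" [])
  let first := (PySem.List.pyRange ((flat.length : Int) - 1) (-1) (-1)).foldl
      (fun (d : PySem.Dict String Int) i => d.insert (PySem.List.pyGetD flat i "") i)
      PySem.Dict.empty
  let order := PySem.List.sorted first.keys (fun k => first.getD k 0) false
  (PySem.List.enumerate order).map (fun p => (p.2, p.1))

-- ===== PRECONDITION & SPEC =====
-- Pre_ excludes inputs where some entry lacks the 'train_df' key: there A (and B) raise KeyError.
def Pre_get_all_images_dict (data : List (List (String × List String))) : Prop :=
  (data.all (fun train_data => (PySem.Dict.mk train_data).contains "train_df")) = true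
instance (data : List (List (String × List String))) : Decidable (Pre_get_all_images_dict data) := by unfold Pre_get_all_images_dict; infer_instance
def pvWitness_get_all_images_dict : (List (List (String × List String))) :=
  [[("train_df", ["a", "b"])], [("train_df", ["b", "c"]), ("x", [])]]
def Spec_get_all_images_dict (data : List (List (String × List String))) (out : List (String × Int)) : Prop := out = get_all_images_dict_alt data
instance (data : List (List (String × List String))) (out : List (String × Int)) : Decidable (Spec_get_all_images_dict data out) := by unfold Spec_get_all_images_dict; infer_instance

-- ===== CLAIM (what is proved, stated in full; the proofs are below) =====
def Claim_equal_get_all_images_dict : Prop := ∀ (data : List (List (String × List String))), Dom_get_all_images_dict data → Pre_get_all_images_dict data → Spec_get_all_images_dict data (get_all_images_dict data)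

-- ===== LEMMAS AND PROOFS =====

-- ---------- A-side: A's fold computes enumerate (dedup flat) ----------

-- A's inner loop step, over one filename
def pvStep (st : PySem.Dict String Int × Int) (name : String) : PySem.Dict String Int × Int :=
  if st.1.contains name then st else (st.1.insert name st.2, st.2 + 1)

-- the enumerate index is unused: the inner fold is a fold over the names themselves
lemma pv_enum_fold (l : List String) (s : Int) (st : PySem.Dict String Int × Int) :
    (PySem.List.enumerate l s).foldl
      (fun (st : PySem.Dict String Int × Int) p =>
        if st.1.contains p.2 then st else (st.1.insert p.2 st.2, st.2 + 1)) st
    = l.foldl pvStep st := by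
  induction l generalizing s st with
  | nil => simp [PySem.List.enumerate_nil]
  | cons x l ih => simp [PySem.List.enumerate_cons, ih, pvStep]

-- the fold over data of folds over each name list is the fold over the flattened names
lemma pv_flat_fold (g : List (String × List String) → List String)
    (data : List (List (String × List String))) (init : PySem.Dict String Int × Int) :
    data.foldl (fun st td => (g td).foldl pvStep st) init
    = (data.flatMap g).foldl pvStep init := by
  induction data generalizing init with
  | nil => simp
  | cons td data ih => simp [List.flatMap_cons, List.foldl_append, ih]

-- invariant: a state (dict of the enumerated nodup list s, |s|) evolves under pvStep
-- exactly as s evolves under Set.add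
lemma pv_main (l s : List String) :
    l.foldl pvStep
      (PySem.Dict.mk ((PySem.List.enumerate s 0).map (fun p => (p.2, p.1))), (s.length : Int))
    = (PySem.Dict.mk ((PySem.List.enumerate (l.foldl PySem.Set.add s) 0).map (fun p => (p.2, p.1))),
       ((l.foldl PySem.Set.add s).length : Int)) := by
  induction l generalizing s with
  | nil => simp
  | cons x l ih =>
      have hkeys : (PySem.Dict.mk ((PySem.List.enumerate s 0).map (fun p => (p.2, p.1)))).keys = s := by
        simp [PySem.Dict.keys_mk, List.map_map]
        exact PySem.List.map_snd_enumerate s 0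
      have hcont : (PySem.Dict.mk ((PySem.List.enumerate s 0).map (fun p => (p.2, p.1)))).contains x
          = decide (x ∈ s) := by
        rw [PySem.Dict.contains_eq_decide_mem_keys, hkeys]
      by_cases hx : x ∈ s
      · have hadd : PySem.Set.add s x = s := by
          simp [PySem.Set.add, PySem.Set.contains, hx]
        simp only [List.foldl_cons, pvStep, hcont, hx, decide_true, if_true, hadd]
        exact ih s
      · have hadd : PySem.Set.add s x = s ++ [x] := by
          simp [PySem.Set.add, PySem.Set.contains, hx]
        have hins : (PySem.Dict.mk ((PySem.List.enumerate s 0).map (fun p => (p.2, p.1)))).insert x (s.length : Int)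
            = PySem.Dict.mk ((PySem.List.enumerate (s ++ [x]) 0).map (fun p => (p.2, p.1))) := by
          apply PySem.Dict.ext
          rw [PySem.Dict.items_insert_of_not_contains _ _ (by simp [hcont, hx])]
          simp [PySem.List.enumerate_append, PySem.List.enumerate_cons, PySem.List.enumerate_nil]
        simp only [List.foldl_cons, pvStep, hcont, hx, decide_false, hadd]
        rw [hins]
        have hlen : ((s.length : Int) + 1) = (((s ++ [x]).length : Int)) := by
          simp
        rw [hlen]
        exact ih (s ++ [x])

-- A's result, in closed form
lemma pv_A_closed (data : List (List (String × List String))) :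
    get_all_images_dict data
    = (PySem.List.enumerate (PySem.List.dedup
          (data.flatMap (fun td => (PySem.Dict.mk td).getD "train_df" []))) 0).map
        (fun p => (p.2, p.1)) := by
  unfold get_all_images_dict
  simp only [pv_enum_fold]
  rw [pv_flat_fold]
  have h0 : ((PySem.Dict.empty, (0 : Int)) : PySem.Dict String Int × Int)
      = (PySem.Dict.mk ((PySem.List.enumerate ([] : List String) 0).map (fun p => (p.2, p.1))), (([] : List String).length : Int)) := by
    simp [PySem.Dict.empty, PySem.List.enumerate_nil]
  rw [h0, pv_main]
  simp [PySem.List.dedup_eq_ofList, PySem.Set.ofList_eq_foldl]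

-- ---------- B-side: the reverse overwrite pass records first occurrences ----------

-- the first-occurrence index of x in xs, as the Int B's dict stores (0 if absent, unused there)
def pvIdx (xs : List String) (x : String) : Int :=
  (((PySem.List.index? xs x).getD 0 : Nat) : Int)

lemma pvIdx_nonneg (xs : List String) (x : String) : 0 ≤ pvIdx xs x := by
  unfold pvIdx; exact Int.natCast_nonneg _

lemma pvIdx_cons_self (x : String) (xs : List String) : pvIdx (x :: xs) x = 0 := by
  unfold pvIdx
  rw [PySem.List.index?_cons_self]
  rfl

lemma pvIdx_cons_of_ne (x y : String) (xs : List String) (hy : y ∈ xs) (hne : x ≠ y) :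
    pvIdx (x :: xs) y = pvIdx xs y + 1 := by
  have h := (PySem.List.index?_isSome_iff xs y).mpr hy
  cases h' : PySem.List.index? xs y with
  | none => rw [h'] at h; simp at h
  | some m =>
      unfold pvIdx
      rw [PySem.List.index?_cons_of_ne _ hne, h']
      simp

-- the reverse index loop: its dict answers with the first-occurrence index in the prefix seen so far
lemma pv_first_get (flat : List String) (a : Nat) (ha : a ≤ flat.length)
    (d : PySem.Dict String Int) (x : String) :
    ((PySem.List.pyRange ((a : Int) - 1) (-1) (-1)).foldl
      (fun (d : PySem.Dict String Int) i => d.insert (PySem.List.pyGetD flat i "") i) d).get? x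
    = ((PySem.List.index? (flat.take a) x).map (fun (m : Nat) => (m : Int))).or (d.get? x) := by
  induction a generalizing d with
  | zero =>
      rw [PySem.List.pyRange_neg_one_eq_nil (by norm_num)]
      simp [PySem.List.index?]
  | succ a ih =>
      have ha' : a < flat.length := ha
      have hcons : PySem.List.pyRange (((a + 1 : Nat) : Int) - 1) (-1) (-1)
          = ((a : Nat) : Int) :: PySem.List.pyRange ((a : Int) - 1) (-1) (-1) := by
        have h2 : (((a + 1 : Nat) : Int) - 1) = ((a : Nat) : Int) := by push_cast; ring
        rw [h2, PySem.List.pyRange_neg_one_cons (by omega)]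
      rw [hcons, List.foldl_cons]
      have hget : PySem.List.pyGetD flat ((a : Nat) : Int) "" = flat[a] := by
        rw [PySem.List.pyGetD_natCast]
        simp [List.getD_eq_getElem?_getD, ha']
      rw [hget, ih (le_of_lt ha')]
      have htake : flat.take (a + 1) = flat.take a ++ [flat[a]] := by
        rw [List.take_add_one]
        simp [List.getElem?_eq_getElem ha']
      rw [htake]
      by_cases hmem : x ∈ flat.take a
      · rw [PySem.List.index?_append_of_mem _ hmem]
        have h := (PySem.List.index?_isSome_iff (flat.take a) x).mpr hmem
        cases h' : PySem.List.index? (flat.take a) x with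
        | none => rw [h'] at h; simp at h
        | some m => rfl
      · have hnone : PySem.List.index? (flat.take a) x = none :=
          (PySem.List.index?_eq_none_iff _ _).mpr hmem
        rw [hnone]
        by_cases hx : x = flat[a]
        · subst hx
          rw [PySem.List.index?_append_singleton_self _ _ hmem]
          simp [PySem.Dict.get?_insert_self, List.length_take, Nat.min_eq_left (le_of_lt ha')]
        · have hn2 : PySem.List.index? (flat.take a ++ [flat[a]]) x = none := by
            rw [PySem.List.index?_eq_none_iff]
            simp only [List.mem_append, List.mem_singleton, not_or]
            exact ⟨hmem, hx⟩
          rw [hn2, PySem.Dict.get?_insert]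
          simp [hx]

-- B's first-dict lookup, at full length: the first-occurrence index in flat
lemma pv_first_getD (flat : List String) (x : String) (hx : x ∈ flat) :
    ((PySem.List.pyRange ((flat.length : Int) - 1) (-1) (-1)).foldl
      (fun (d : PySem.Dict String Int) i => d.insert (PySem.List.pyGetD flat i "") i)
      PySem.Dict.empty).getD x 0 = pvIdx flat x := by
  rw [PySem.Dict.getD_eq_get?_getD, pv_first_get flat flat.length le_rfl, List.take_length]
  have h := (PySem.List.index?_isSome_iff flat x).mpr hx
  cases h' : PySem.List.index? flat x with
  | none => rw [h'] at h; simp at h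
  | some m =>
      unfold pvIdx
      rw [h']
      rfl

-- B's first-dict keys: the distinct names, in reverse-scan first-insertion order
lemma pv_first_keys (flat : List String) :
    ((PySem.List.pyRange ((flat.length : Int) - 1) (-1) (-1)).foldl
      (fun (d : PySem.Dict String Int) i => d.insert (PySem.List.pyGetD flat i "") i)
      PySem.Dict.empty).keys = PySem.Set.ofList flat.reverse := by
  rw [PySem.Dict.keys_foldl_insert_key]
  have hrange : PySem.List.pyRange ((flat.length : Int) - 1) (-1) (-1)
      = (PySem.List.pyRange 0 (flat.length : Int) 1).reverse := by
    rw [PySem.List.pyRange_neg_one_eq_reverse]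
    norm_num
  rw [hrange, List.map_reverse, PySem.List.map_pyGetD_pyRange_zero']
  simp [PySem.Dict.keys_empty, PySem.Set.update, PySem.Set.ofList_eq_foldl]

-- running Set.add from an accumulator s: the later distinct elements not already in s are appended
lemma pv_ofList_acc (xs : List String) (s : PySem.Set String) :
    xs.foldl PySem.Set.add s = s ++ (PySem.Set.ofList xs).filter (fun y => !decide (y ∈ s)) := by
  induction xs generalizing s with
  | nil => simp [PySem.Set.ofList_eq_foldl]
  | cons y xs ih =>
      have hofl : PySem.Set.ofList (y :: xs)
          = y :: (PySem.Set.ofList xs).filter (fun z => !decide (z = y)) := by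
        rw [PySem.Set.ofList_eq_foldl, List.foldl_cons]
        have h1 : PySem.Set.add ([] : PySem.Set String) y = [y] := by
          simp [PySem.Set.add, PySem.Set.contains]
        rw [h1, ih]
        simp [eq_comm]
      rw [List.foldl_cons, ih, hofl]
      have hadd : PySem.Set.add s y = if y ∈ s then s else s ++ [y] := by
        simp [PySem.Set.add, PySem.Set.contains]
      by_cases hy : y ∈ s
      · rw [hadd, if_pos hy]
        congr 1
        rw [List.filter_cons_of_neg (by simp [hy]), List.filter_filter]
        apply List.filter_congr
        intro z _
        by_cases hzs : z ∈ s
        · simp [hzs]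
        · have hzy : z ≠ y := fun h => hzs (h ▸ hy)
          simp [hzs, hzy]
      · rw [hadd, if_neg hy, List.append_assoc]
        congr 1
        rw [List.filter_cons_of_pos (by simp [hy]), List.singleton_append, List.filter_filter]
        congr 1
        apply List.filter_congr
        intro z _
        by_cases hzy : z = y
        · subst hzy; simp [hy]
        · by_cases hzs : z ∈ s <;> simp [hzy, hzs]

lemma pv_dedup_cons (x : String) (xs : List String) :
    PySem.List.dedup (x :: xs)
    = x :: (PySem.List.dedup xs).filter (fun z => !decide (z = x)) := by
  rw [PySem.List.dedup_eq_ofList, PySem.List.dedup_eq_ofList,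
      PySem.Set.ofList_eq_foldl, PySem.Set.ofList_eq_foldl, List.foldl_cons]
  have h1 : PySem.Set.add ([] : PySem.Set String) x = [x] := by
    simp [PySem.Set.add, PySem.Set.contains]
  rw [h1, pv_ofList_acc]
  simp [PySem.Set.ofList_eq_foldl, eq_comm]

-- first-occurrence indices are strictly increasing along dedup
lemma pv_dedup_pairwise (xs : List String) :
    (PySem.List.dedup xs).Pairwise (fun a b => pvIdx xs a < pvIdx xs b) := by
  induction xs with
  | nil => simp [PySem.List.dedup_eq_ofList, PySem.Set.ofList_eq_foldl]
  | cons x xs ih =>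
      rw [pv_dedup_cons]
      refine List.Pairwise.cons ?_ ?_
      · intro b hb
        have hbx : b ≠ x := by
          have := List.of_mem_filter hb; simpa using this
        have hbxs : b ∈ xs :=
          (PySem.List.mem_dedup xs b).mp (List.mem_of_mem_filter hb)
        rw [pvIdx_cons_self, pvIdx_cons_of_ne x b xs hbxs (Ne.symm hbx)]
        have := pvIdx_nonneg xs b
        omega
      · refine List.Pairwise.imp_of_mem (fun {a b} ha hb hr => ?_) (List.Pairwise.filter _ ih)
        have hax : a ≠ x := by
          have := List.of_mem_filter ha; simpa using this
        have hbx : b ≠ x := by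
          have := List.of_mem_filter hb; simpa using this
        have haxs : a ∈ xs :=
          (PySem.List.mem_dedup xs a).mp (List.mem_of_mem_filter ha)
        have hbxs : b ∈ xs :=
          (PySem.List.mem_dedup xs b).mp (List.mem_of_mem_filter hb)
        rw [pvIdx_cons_of_ne x a xs haxs (Ne.symm hax),
            pvIdx_cons_of_ne x b xs hbxs (Ne.symm hbx)]
        omega

-- B's sort reproduces first-appearance order: sorted(keys, key=first position) = dedup flat
lemma pv_sorted_keyed (flat : List String) :
    PySem.List.sorted (PySem.Set.ofList flat.reverse)
      (fun k => ((PySem.List.pyRange ((flat.length : Int) - 1) (-1) (-1)).foldl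
        (fun (d : PySem.Dict String Int) i => d.insert (PySem.List.pyGetD flat i "") i)
        PySem.Dict.empty).getD k 0) false
    = PySem.List.dedup flat := by
  apply PySem.List.sorted_eq_of_perm_of_pairwise_lt
  · apply (List.perm_ext_iff_of_nodup (PySem.List.nodup_dedup flat) (PySem.Set.nodup_ofList _)).mpr
    intro a
    rw [PySem.List.mem_dedup, PySem.Set.mem_ofList, List.mem_reverse]
  · refine List.Pairwise.imp_of_mem (fun {a b} ha hb hr => ?_) (pv_dedup_pairwise flat)
    have ha' : a ∈ flat := (PySem.List.mem_dedup flat a).mp ha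
    have hb' : b ∈ flat := (PySem.List.mem_dedup flat b).mp hb
    rw [pv_first_getD flat a ha', pv_first_getD flat b hb']
    exact hr

-- B's result, in the same closed form
lemma pv_B_closed (data : List (List (String × List String))) :
    get_all_images_dict_alt data
    = (PySem.List.enumerate (PySem.List.dedup
          (data.flatMap (fun td => (PySem.Dict.mk td).getD "train_df" []))) 0).map
        (fun p => (p.2, p.1)) := by
  simp only [get_all_images_dict_alt]
  rw [pv_first_keys, pv_sorted_keyed]

-- ===== VERDICT (by name: the statement is the Claim_ definition above) =====
theorem get_all_images_dict_spec : Claim_equal_get_all_images_dict := by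
  intro data _ _
  unfold Spec_get_all_images_dict
  rw [pv_A_closed, pv_B_closed]
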